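-- pv_equiv track=rewrite | github.com/bgawkuc/ASD-AGH-2021 | ASD_exams/20_21/2_term/3.lamps.py | lamps
-- ===== SOURCE A (Python) =====
-- def lamps(n, A):
--     color = [0] * n
--     currBlue = maxBlue = 0
--
--     for i in range(len(A)):
--         for j in range(A[i][0], A[i][1] + 1):
--
--             if color[j] == 0:
--                 color[j] = 1
--
--             # gdy zmieniam na niebieski
--             elif color[j] == 1:
--                 color[j] = 2
--                 currBlue += 1
--
--             # gdy zmieniam z niebieskiego
--             elif color[j] == 2:
--                 color[j] = 0
--                 currBlue -= 1
--
--         maxBlue = max(maxBlue, currBlue)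
--
--     return maxBlue
-- ===== SOURCE B (Python) =====
-- def lamps(n, A):
--     # Alternative: keep raw toggle counts per cell (no 0/1/2 state machine, no
--     # incremental blue counter); after each query recount the cells whose count
--     # is 2 mod 3 and keep the running maximum.
--     cnt = [0] * n
--     best = 0
--     for i in range(len(A)):
--         for j in range(A[i][0], A[i][1] + 1):
--             cnt[j] += 1
--         blue = 0
--         for c in cnt:
--             if c % 3 == 2:
--                 blue += 1
--         best = max(best, blue)
--     return best
-- ===== Notes on version B (the rewrite author's own statement) =====
-- stated objective: alternative
-- what changed: A keeps a 0/1/2 color state machine per cell (three-way branch on each toggle) and maintains the blue count incrementally; B keeps only raw toggle counts (a one-line unconditional increment) and recounts the cells whose count is 2 mod 3 from scratch after each query.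
import Mathlib
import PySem

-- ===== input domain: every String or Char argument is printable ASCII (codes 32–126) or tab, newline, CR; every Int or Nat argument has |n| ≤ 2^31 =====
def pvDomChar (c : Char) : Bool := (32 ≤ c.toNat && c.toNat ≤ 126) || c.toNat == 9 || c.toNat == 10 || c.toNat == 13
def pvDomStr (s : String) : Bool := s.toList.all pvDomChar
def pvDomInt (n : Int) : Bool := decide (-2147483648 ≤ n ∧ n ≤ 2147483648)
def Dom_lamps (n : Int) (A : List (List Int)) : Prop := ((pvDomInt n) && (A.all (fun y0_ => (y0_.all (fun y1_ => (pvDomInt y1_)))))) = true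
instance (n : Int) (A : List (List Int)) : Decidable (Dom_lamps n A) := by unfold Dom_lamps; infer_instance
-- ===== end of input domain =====

-- B replaces A's 0/1/2 state machine with incrementally maintained blue counter by raw toggle
-- counts per cell and a full per-query recount of the cells at 2 mod 3 (objective: alternative).

-- ===== PORT A =====
-- one step of A's inner loop: branch on color[j] and toggle it (negative j wraps, as in Python)
def lampsToggle (st : List Int × Int) (j : Int) : List Int × Int :=
  let v := PySem.List.pyGetD st.1 j 0
  if v = 0 then (PySem.List.pySetD st.1 j 1, st.2)
  else if v = 1 then (PySem.List.pySetD st.1 j 2, st.2 + 1)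
  else if v = 2 then (PySem.List.pySetD st.1 j 0, st.2 - 1)
  else st

def lamps (n : Int) (A : List (List Int)) : Int :=
  let st := A.foldl
    (fun (st : List Int × Int × Int) row =>
      let p := (PySem.List.pyRange (PySem.List.pyGetD row 0 0) (PySem.List.pyGetD row 1 0 + 1) 1).foldl
        lampsToggle (st.1, st.2.1)
      (p.1, p.2, max st.2.2 p.2))
    (List.replicate n.toNat (0 : Int), 0, 0)
  st.2.2

-- ===== PORT B =====
def lamps_alt (n : Int) (A : List (List Int)) : Int :=
  let st := A.foldl
    (fun (st : List Int × Int) row =>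
      let cnt := (PySem.List.pyRange (PySem.List.pyGetD row 0 0) (PySem.List.pyGetD row 1 0 + 1) 1).foldl
        (fun cnt j => PySem.List.pySetD cnt j (PySem.List.pyGetD cnt j 0 + 1)) st.1
      let blue := cnt.foldl (fun acc c => if PySem.Int.mod c 3 = 2 then acc + 1 else acc) 0
      (cnt, max st.2 blue))
    (List.replicate n.toNat (0 : Int), 0)
  st.2

-- ===== PRECONDITION & SPEC =====
-- Pre_ excludes exactly the inputs on which A raises IndexError: a row with fewer than 2
-- entries, or a nonempty interval [l,r] reaching an index outside [-n,n).
def Pre_lamps (n : Int) (A : List (List Int)) : Prop :=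
  ∀ row ∈ A, 2 ≤ row.length ∧
    (PySem.List.pyGetD row 1 0 < PySem.List.pyGetD row 0 0 ∨
     (-n ≤ PySem.List.pyGetD row 0 0 ∧ PySem.List.pyGetD row 1 0 < n))
instance (n : Int) (A : List (List Int)) : Decidable (Pre_lamps n A) := by
  unfold Pre_lamps; infer_instance

def pvWitness_lamps : Int × List (List Int) := (3, [[0, 1], [1, 2], [0, 2]])

def Spec_lamps (n : Int) (A : List (List Int)) (out : Int) : Prop := out = lamps_alt n A
instance (n : Int) (A : List (List Int)) (out : Int) : Decidable (Spec_lamps n A out) := by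
  unfold Spec_lamps; infer_instance

-- ===== CLAIM (what is proved, stated in full; the proofs are below) =====
def Claim_equal_lamps : Prop := ∀ (n : Int) (A : List (List Int)), Dom_lamps n A → Pre_lamps n A → Spec_lamps n A (lamps n A)

-- ===== LEMMAS AND PROOFS =====

-- the per-query blue recount of B, as a function
def lampsCount2 (cnt : List Int) : Int :=
  cnt.foldl (fun acc c => if PySem.Int.mod c 3 = 2 then acc + 1 else acc) 0

theorem lamps_count2_eq (cnt : List Int) :
    lampsCount2 cnt = ((cnt.countP (fun c => decide (PySem.Int.mod c 3 = 2)) : Nat) : Int) := by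
  have := PySem.List.foldl_count_if (fun c => decide (PySem.Int.mod c 3 = 2)) cnt 0
  simpa [lampsCount2] using this

-- normalization of a (possibly negative) in-range Python index
theorem lamps_pyIdx (len : Nat) (j : Int) (h1 : -(len : Int) ≤ j) (h2 : j < (len : Int)) :
    ∃ i : Nat, i < len ∧ PySem.List.pyIdx? len j = some i ∧
      (0 ≤ j → (i : Int) = j) := by
  by_cases h0 : 0 ≤ j
  · exact ⟨j.toNat, by omega, by simp [PySem.List.pyIdx?, h0, h2], by intro; omega⟩
  · refine ⟨len - (-j).toNat, by omega, ?_, by intro; omega⟩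
    simp only [PySem.List.pyIdx?, if_neg h0, if_pos h1]

theorem lamps_pyGetD_idx (xs : List Int) (j : Int) (i : Nat) (d : Int)
    (hidx : PySem.List.pyIdx? xs.length j = some i) (hi : i < xs.length) :
    PySem.List.pyGetD xs j d = xs.getD i d := by
  simp [PySem.List.pyGetD, PySem.List.pyGet?, hidx, List.getD_eq_getElem?_getD,
    List.getElem?_eq_getElem hi]

theorem lamps_pySetD_idx (xs : List Int) (j : Int) (i : Nat) (v : Int)
    (hidx : PySem.List.pyIdx? xs.length j = some i) :
    PySem.List.pySetD xs j v = xs.set i v := by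
  simp [PySem.List.pySetD, PySem.List.pySet?, hidx]

theorem lamps_step_rel (cnt : List Int) (j : Int)
    (h1 : -(cnt.length : Int) ≤ j) (h2 : j < (cnt.length : Int)) :
    lampsToggle (cnt.map (fun c => PySem.Int.mod c 3), lampsCount2 cnt) j
    = ((PySem.List.pySetD cnt j (PySem.List.pyGetD cnt j 0 + 1)).map (fun c => PySem.Int.mod c 3),
       lampsCount2 (PySem.List.pySetD cnt j (PySem.List.pyGetD cnt j 0 + 1))) := by
  obtain ⟨i, hi, hidx, -⟩ := lamps_pyIdx cnt.length j h1 h2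
  have hmlen : (cnt.map (fun c => PySem.Int.mod c 3)).length = cnt.length := by simp
  have hget : PySem.List.pyGetD cnt j 0 = cnt.getD i 0 := lamps_pyGetD_idx cnt j i 0 hidx hi
  have hgetm : PySem.List.pyGetD (cnt.map (fun c => PySem.Int.mod c 3)) j 0
      = PySem.Int.mod (cnt.getD i 0) 3 := by
    rw [lamps_pyGetD_idx _ j i 0 (by rw [hmlen]; exact hidx) (by rw [hmlen]; exact hi)]
    simp [List.getD_eq_getElem?_getD, List.getElem?_eq_getElem hi, List.getElem?_map]
  have hsetc : PySem.List.pySetD cnt j (PySem.List.pyGetD cnt j 0 + 1)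
      = cnt.set i (cnt.getD i 0 + 1) := by
    rw [hget]; exact lamps_pySetD_idx cnt j i _ hidx
  have hsetm : ∀ w : Int, PySem.List.pySetD (cnt.map (fun c => PySem.Int.mod c 3)) j w
      = (cnt.map (fun c => PySem.Int.mod c 3)).set i w := fun w =>
    lamps_pySetD_idx _ j i w (by rw [hmlen]; exact hidx)
  set c := cnt.getD i 0 with hc
  have hcel : cnt[i]'hi = c := by
    rw [hc, List.getD_eq_getElem?_getD, List.getElem?_eq_getElem hi]; rfl
  have e1 : PySem.Int.mod c 3 = c % 3 := PySem.Int.mod_eq_emod_of_pos (by norm_num)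
  have e2 : PySem.Int.mod (c + 1) 3 = (c + 1) % 3 := PySem.Int.mod_eq_emod_of_pos (by norm_num)
  have hcount : lampsCount2 (cnt.set i (c + 1))
      = lampsCount2 cnt - (if PySem.Int.mod c 3 = 2 then 1 else 0)
        + (if PySem.Int.mod (c + 1) 3 = 2 then 1 else 0) := by
    rw [lamps_count2_eq, lamps_count2_eq, List.countP_set hi]
    simp only [hcel, decide_eq_true_eq]
    have hmem : c ∈ cnt := by rw [← hcel]; exact List.getElem_mem hi
    by_cases ha : PySem.Int.mod c 3 = 2
    · have hp : 0 < cnt.countP (fun x => decide (PySem.Int.mod x 3 = 2)) :=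
        Nat.pos_of_ne_zero (fun h0 => (List.countP_eq_zero.1 h0) c hmem (by simpa using ha))
      by_cases hb : PySem.Int.mod (c + 1) 3 = 2 <;> rw [if_pos ha] <;>
        [rw [if_pos hb]; rw [if_neg hb]] <;> omega
    · by_cases hb : PySem.Int.mod (c + 1) 3 = 2 <;> rw [if_neg ha] <;>
        [rw [if_pos hb]; rw [if_neg hb]] <;> omega
  have hsetfin : (cnt.set i (c + 1)).map (fun x => PySem.Int.mod x 3)
      = (cnt.map (fun x => PySem.Int.mod x 3)).set i (PySem.Int.mod (c + 1) 3) := by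
    rw [List.map_set]
  simp only [lampsToggle, hgetm, hsetc, hsetm, hcount, hsetfin]
  have hv : c % 3 = 0 ∨ c % 3 = 1 ∨ c % 3 = 2 := by omega
  rcases hv with h | h | h
  · rw [if_pos (by rw [e1]; omega : PySem.Int.mod c 3 = 0),
        (by rw [e2]; omega : PySem.Int.mod (c + 1) 3 = 1),
        if_neg (by rw [e1]; omega : ¬ PySem.Int.mod c 3 = 2),
        if_neg (by omega : ¬ (1 : Int) = 2)]
    exact Prod.ext rfl (by ring)
  · rw [if_neg (by rw [e1]; omega : ¬ PySem.Int.mod c 3 = 0),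
        if_pos (by rw [e1]; omega : PySem.Int.mod c 3 = 1),
        (by rw [e2]; omega : PySem.Int.mod (c + 1) 3 = 2),
        if_neg (by rw [e1]; omega : ¬ PySem.Int.mod c 3 = 2),
        if_pos (rfl : (2 : Int) = 2)]
    exact Prod.ext rfl (by ring)
  · rw [if_neg (by rw [e1]; omega : ¬ PySem.Int.mod c 3 = 0),
        if_neg (by rw [e1]; omega : ¬ PySem.Int.mod c 3 = 1),
        if_pos (by rw [e1]; omega : PySem.Int.mod c 3 = 2),
        if_pos (by rw [e1]; omega : PySem.Int.mod c 3 = 2),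
        (by rw [e2]; omega : PySem.Int.mod (c + 1) 3 = 0),
        if_neg (by omega : ¬ (0 : Int) = 2)]
    exact Prod.ext rfl (by ring)

theorem lamps_fold_rel (js : List Int) :
    ∀ (cnt : List Int),
    (∀ j ∈ js, -(cnt.length : Int) ≤ j ∧ j < (cnt.length : Int)) →
    js.foldl lampsToggle (cnt.map (fun c => PySem.Int.mod c 3), lampsCount2 cnt)
    = ((js.foldl (fun cnt j => PySem.List.pySetD cnt j (PySem.List.pyGetD cnt j 0 + 1)) cnt).map
         (fun c => PySem.Int.mod c 3),
       lampsCount2 (js.foldl (fun cnt j => PySem.List.pySetD cnt j (PySem.List.pyGetD cnt j 0 + 1)) cnt)) := by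
  induction js with
  | nil => intro cnt _; simp
  | cons j js ih =>
    intro cnt hb
    rw [List.foldl_cons, List.foldl_cons,
      lamps_step_rel cnt j (hb j (by simp)).1 (hb j (by simp)).2]
    apply ih
    intro j' hj'
    rw [PySem.List.length_pySetD]
    exact hb j' (by simp [hj'])

theorem lamps_len_foldl (js : List Int) :
    ∀ cnt : List Int,
    (js.foldl (fun cnt j => PySem.List.pySetD cnt j (PySem.List.pyGetD cnt j 0 + 1)) cnt).length
      = cnt.length := by
  induction js with
  | nil => intro cnt; rfl
  | cons j js ih =>
    intro cnt
    rw [List.foldl_cons, ih, PySem.List.length_pySetD]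

theorem lamps_outer_rel (rows : List (List Int)) :
    ∀ (cnt : List Int) (m : Int),
    (∀ row ∈ rows, PySem.List.pyGetD row 1 0 < PySem.List.pyGetD row 0 0 ∨
      (-(cnt.length : Int) ≤ PySem.List.pyGetD row 0 0 ∧
        PySem.List.pyGetD row 1 0 < (cnt.length : Int))) →
    (rows.foldl
      (fun (st : List Int × Int × Int) row =>
        let p := (PySem.List.pyRange (PySem.List.pyGetD row 0 0) (PySem.List.pyGetD row 1 0 + 1) 1).foldl
          lampsToggle (st.1, st.2.1)
        (p.1, p.2, max st.2.2 p.2))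
      (cnt.map (fun c => PySem.Int.mod c 3), lampsCount2 cnt, m)).2.2
    = (rows.foldl
      (fun (st : List Int × Int) row =>
        let cnt := (PySem.List.pyRange (PySem.List.pyGetD row 0 0) (PySem.List.pyGetD row 1 0 + 1) 1).foldl
          (fun cnt j => PySem.List.pySetD cnt j (PySem.List.pyGetD cnt j 0 + 1)) st.1
        let blue := cnt.foldl (fun acc c => if PySem.Int.mod c 3 = 2 then acc + 1 else acc) 0
        (cnt, max st.2 blue))
      (cnt, m)).2 := by
  induction rows with
  | nil => intro cnt m _; rfl
  | cons row rs ih =>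
    intro cnt m hb
    simp only [List.foldl_cons]
    have hjs : ∀ j ∈ PySem.List.pyRange (PySem.List.pyGetD row 0 0) (PySem.List.pyGetD row 1 0 + 1) 1,
        -(cnt.length : Int) ≤ j ∧ j < (cnt.length : Int) := by
      intro j hj
      rw [PySem.List.mem_pyRange_one] at hj
      rcases hb row (by simp) with h | h
      · omega
      · omega
    rw [lamps_fold_rel _ cnt hjs]
    have hb' : ∀ r ∈ rs, PySem.List.pyGetD r 1 0 < PySem.List.pyGetD r 0 0 ∨
        (-(((PySem.List.pyRange (PySem.List.pyGetD row 0 0) (PySem.List.pyGetD row 1 0 + 1) 1).foldl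
            (fun cnt j => PySem.List.pySetD cnt j (PySem.List.pyGetD cnt j 0 + 1)) cnt).length : Int)
          ≤ PySem.List.pyGetD r 0 0 ∧
         PySem.List.pyGetD r 1 0 < (((PySem.List.pyRange (PySem.List.pyGetD row 0 0) (PySem.List.pyGetD row 1 0 + 1) 1).foldl
            (fun cnt j => PySem.List.pySetD cnt j (PySem.List.pyGetD cnt j 0 + 1)) cnt).length : Int)) := by
      intro r hr
      rw [lamps_len_foldl]
      exact hb r (by simp [hr])
    exact ih _ _ hb'

theorem lamps_main (n : Int) (A : List (List Int))
    (h : ∀ row ∈ A, PySem.List.pyGetD row 1 0 < PySem.List.pyGetD row 0 0 ∨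
      (-n ≤ PySem.List.pyGetD row 0 0 ∧ PySem.List.pyGetD row 1 0 < n)) :
    lamps n A = lamps_alt n A := by
  have hmap : (List.replicate n.toNat (0 : Int)).map (fun c => PySem.Int.mod c 3)
      = List.replicate n.toNat (0 : Int) := by
    rw [List.map_replicate, show PySem.Int.mod 0 3 = 0 from by decide]
  have hcount : lampsCount2 (List.replicate n.toNat (0 : Int)) = 0 := by
    rw [lamps_count2_eq]
    rw [List.countP_eq_zero.2 (by intro a ha; simp at ha; simp [ha])]
    rfl
  have hb : ∀ row ∈ A, PySem.List.pyGetD row 1 0 < PySem.List.pyGetD row 0 0 ∨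
      (-((List.replicate n.toNat (0 : Int)).length : Int) ≤ PySem.List.pyGetD row 0 0 ∧
       PySem.List.pyGetD row 1 0 < ((List.replicate n.toNat (0 : Int)).length : Int)) := by
    intro row hr
    rw [List.length_replicate]
    rcases h row hr with h1 | ⟨h1, h2⟩
    · exact Or.inl h1
    · by_cases hne : PySem.List.pyGetD row 1 0 < PySem.List.pyGetD row 0 0
      · exact Or.inl hne
      · exact Or.inr ⟨by omega, by omega⟩
  have := lamps_outer_rel A (List.replicate n.toNat (0 : Int)) 0 hb
  rw [hmap, hcount] at this
  exact this

-- ===== VERDICT (by name: the statement is the Claim_ definition above) =====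
theorem lamps_spec : Claim_equal_lamps := by
  intro n A _ hpre
  unfold Spec_lamps
  exact lamps_main n A (fun row hr => (hpre row hr).2)
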